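-- pv_equiv track=rewrite | github.com/zasab/SLURMminer_Engine | functions/SBatchFactory.py | add_dependencies
-- ===== SOURCE A (Python) =====
-- def add_dependencies(job_id, dependecies, connected_jobs, sorted_job_id_dependecies):
--     for dependecy in dependecies:
--         if dependecy in connected_jobs:
--             connected_jobs[dependecy].add(job_id)
--         else:
--             for job_id_key, dep_values in connected_jobs.items():
--                 if dependecy in dep_values:
--                     connected_jobs[job_id_key].add(job_id)
--
--             # add_dependencies(dependecy, dependecy_dependecies, connected_jobs, sorted_job_id_dependecies)
--
--     return connected_jobs
-- ===== SOURCE B (Python) =====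
-- def add_dependencies(job_id, dependecies, connected_jobs, sorted_job_id_dependecies):
--     # Partition the dependencies once: keys of the dict vs. values to look for inside the sets.
--     key_targets = {d for d in dependecies if d in connected_jobs}
--     nonkey = {d for d in dependecies if d not in connected_jobs}
--     for key, vals in connected_jobs.items():
--         if key in key_targets or not nonkey.isdisjoint(vals):
--             vals.add(job_id)
--     return connected_jobs
-- ===== Notes on version B (the rewrite author's own statement) =====
-- stated objective: alternative
-- what changed: Instead of scanning all dict items once per non-key dependency, B partitions the dependencies once into key-targets and non-key values and then makes a single pass over the dict, adding job_id where the key is a target or the entry's set meets the non-key values.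
import Mathlib
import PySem

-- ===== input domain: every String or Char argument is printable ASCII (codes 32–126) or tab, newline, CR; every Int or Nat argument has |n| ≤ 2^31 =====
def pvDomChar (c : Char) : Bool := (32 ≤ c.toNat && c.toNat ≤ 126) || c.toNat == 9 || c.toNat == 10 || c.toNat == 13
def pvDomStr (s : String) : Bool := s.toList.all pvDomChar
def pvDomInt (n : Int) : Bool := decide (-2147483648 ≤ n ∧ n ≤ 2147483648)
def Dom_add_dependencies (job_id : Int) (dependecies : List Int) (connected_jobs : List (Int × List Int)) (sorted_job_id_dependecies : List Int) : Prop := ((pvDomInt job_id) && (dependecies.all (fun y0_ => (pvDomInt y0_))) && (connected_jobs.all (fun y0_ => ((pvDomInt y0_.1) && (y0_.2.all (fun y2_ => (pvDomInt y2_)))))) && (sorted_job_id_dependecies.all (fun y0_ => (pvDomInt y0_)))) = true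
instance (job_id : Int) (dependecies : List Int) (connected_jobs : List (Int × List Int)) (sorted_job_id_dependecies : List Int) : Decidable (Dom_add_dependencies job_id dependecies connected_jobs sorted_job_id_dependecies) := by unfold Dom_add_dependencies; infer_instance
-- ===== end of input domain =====

-- B replaces A's per-dependency scan of all dict items by one partition of the dependencies into
-- key/non-key sets followed by a single pass over the dict (objective: alternative).
-- Python A mutates connected_jobs in place (B performs the same mutation); the equivalence proved
-- here is about the returned value.

-- ===== PORT A =====
-- `connected_jobs[dependecy].add(job_id)` on a dict: update the set of the (unique, under Pre_)
-- entry whose key is `dependecy` — first match, the dict convention.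
def pvModifyFirst (jid : Int) (d : Int) : List (Int × List Int) → List (Int × List Int)
  | [] => []
  | p :: rest => if p.1 = d then (p.1, PySem.Set.add p.2 jid) :: rest else p :: pvModifyFirst jid d rest

def pvStepA (jid : Int) (cj : List (Int × List Int)) (d : Int) : List (Int × List Int) :=
  if d ∈ cj.map Prod.fst then
    pvModifyFirst jid d cj
  else
    -- inner loop `for job_id_key, dep_values in connected_jobs.items(): if dependecy in dep_values:
    -- connected_jobs[job_id_key].add(job_id)`: each iteration mutates only the set of the key it is
    -- visiting, so the pass is exactly this per-entry update.
    cj.map (fun p => if d ∈ p.2 then (p.1, PySem.Set.add p.2 jid) else p)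

def add_dependencies (job_id : Int) (dependecies : List Int) (connected_jobs : List (Int × List Int)) (sorted_job_id_dependecies : List Int) : List (Int × List Int) :=
  dependecies.foldl (pvStepA job_id) connected_jobs

-- ===== PORT B =====
def add_dependencies_alt (job_id : Int) (dependecies : List Int) (connected_jobs : List (Int × List Int)) (sorted_job_id_dependecies : List Int) : List (Int × List Int) :=
  -- Source B's two set comprehensions partitioning the dependencies
  let keys := connected_jobs.map Prod.fst
  let key_targets := PySem.Set.ofList (dependecies.filter (fun d => d ∈ keys))
  let nonkey := PySem.Set.ofList (dependecies.filter (fun d => d ∉ keys))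
  -- Source B's single pass over the dict: each iteration reads and mutates only its own entry
  connected_jobs.map (fun p =>
    if p.1 ∈ key_targets ∨ PySem.Set.isdisjoint nonkey p.2 = false then
      (p.1, PySem.Set.add p.2 job_id)
    else p)

-- ===== PRECONDITION & SPEC =====
-- Pre_ excludes association lists with duplicate keys: they are not the image of any Python dict
-- (Python A's connected_jobs is a dict, which cannot carry two entries with the same key).
def Pre_add_dependencies (job_id : Int) (dependecies : List Int) (connected_jobs : List (Int × List Int)) (sorted_job_id_dependecies : List Int) : Prop :=
  (connected_jobs.map Prod.fst).Nodup
instance (job_id : Int) (dependecies : List Int) (connected_jobs : List (Int × List Int)) (sorted_job_id_dependecies : List Int) : Decidable (Pre_add_dependencies job_id dependecies connected_jobs sorted_job_id_dependecies) := by unfold Pre_add_dependencies; infer_instance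

def pvWitness_add_dependencies : Int × List Int × (List (Int × List Int)) × List Int :=
  (7, [1, 2], [(1, [3]), (4, [2])], [])

def Spec_add_dependencies (job_id : Int) (dependecies : List Int) (connected_jobs : List (Int × List Int)) (sorted_job_id_dependecies : List Int) (out : List (Int × List Int)) : Prop := out = add_dependencies_alt job_id dependecies connected_jobs sorted_job_id_dependecies
instance (job_id : Int) (dependecies : List Int) (connected_jobs : List (Int × List Int)) (sorted_job_id_dependecies : List Int) (out : List (Int × List Int)) : Decidable (Spec_add_dependencies job_id dependecies connected_jobs sorted_job_id_dependecies out) := by unfold Spec_add_dependencies; infer_instance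

-- ===== CLAIM (what is proved, stated in full; the proofs are below) =====
def Claim_equal_add_dependencies : Prop := ∀ (job_id : Int) (dependecies : List Int) (connected_jobs : List (Int × List Int)) (sorted_job_id_dependecies : List Int), Dom_add_dependencies job_id dependecies connected_jobs sorted_job_id_dependecies → Pre_add_dependencies job_id dependecies connected_jobs sorted_job_id_dependecies → Spec_add_dependencies job_id dependecies connected_jobs sorted_job_id_dependecies (add_dependencies job_id dependecies connected_jobs sorted_job_id_dependecies)

-- ===== LEMMAS AND PROOFS =====

-- the common shape of both results: every entry whose key satisfies f gets job_id added to its set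
def pvApply (jid : Int) (f : Int × List Int → Bool) (cj : List (Int × List Int)) : List (Int × List Int) :=
  cj.map (fun p => if f p then (p.1, PySem.Set.add p.2 jid) else p)

-- the keys (of the original cj) a single dependency d hits
def pvHit (keys : List Int) (d : Int) (p : Int × List Int) : Bool :=
  if d ∈ keys then decide (p.1 = d) else decide (d ∈ p.2)

lemma pvApply_false (jid : Int) (cj : List (Int × List Int)) :
    pvApply jid (fun _ => false) cj = cj := by
  simp [pvApply]

lemma pvApply_fst (jid : Int) (f : Int × List Int → Bool) (cj : List (Int × List Int)) :
    (pvApply jid f cj).map Prod.fst = cj.map Prod.fst := by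
  induction cj with
  | nil => rfl
  | cons p rest ih =>
      simp only [pvApply, List.map_cons] at *
      by_cases h : f p <;> simp [h, ih]

lemma pvModifyFirst_apply (jid d : Int) (f : Int × List Int → Bool)
    (cj : List (Int × List Int)) (hnd : (cj.map Prod.fst).Nodup) :
    pvModifyFirst jid d (pvApply jid f cj) = pvApply jid (fun p => f p || decide (p.1 = d)) cj := by
  induction cj with
  | nil => rfl
  | cons p rest ih =>
      simp only [List.map_cons, List.nodup_cons] at hnd
      simp only [pvApply, List.map_cons, pvModifyFirst]
      have hq1 : (if f p = true then (p.1, PySem.Set.add p.2 jid) else p).1 = p.1 := by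
        by_cases hf : f p <;> simp [hf]
      by_cases hd : p.1 = d
      · rw [if_pos (hq1.trans hd)]
        have hq2 : PySem.Set.add (if f p = true then (p.1, PySem.Set.add p.2 jid) else p).2 jid
            = PySem.Set.add p.2 jid := by
          by_cases hf : f p <;> simp [hf]
        have htail :
            List.map (fun q => if (f q || decide (q.1 = d)) = true then (q.1, PySem.Set.add q.2 jid) else q) rest
              = List.map (fun q => if f q = true then (q.1, PySem.Set.add q.2 jid) else q) rest := by
          apply List.map_congr_left
          intro q hq
          have hne : ¬ (q.1 = d) := by
            intro h
            apply hnd.1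
            rw [hd, ← h]
            exact List.mem_map.mpr ⟨q, hq, rfl⟩
          simp [hne]
        have hg : (f p || decide (p.1 = d)) = true := by simp [hd]
        rw [htail]
        simp [hg, hq1, hq2]
      · rw [if_neg (by rw [hq1]; exact hd)]
        have hrest := ih hnd.2
        simp only [pvApply] at hrest
        simp [hd, hrest]

lemma pvStepA_apply (jid d : Int) (f : Int × List Int → Bool)
    (cj : List (Int × List Int)) (hnd : (cj.map Prod.fst).Nodup) :
    pvStepA jid (pvApply jid f cj) d
      = pvApply jid (fun p => f p || pvHit (cj.map Prod.fst) d p) cj := by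
  unfold pvStepA
  rw [pvApply_fst]
  by_cases hk : d ∈ cj.map Prod.fst
  · rw [if_pos hk, pvModifyFirst_apply jid d f cj hnd]
    simp only [pvHit, if_pos hk]
  · rw [if_neg hk]
    simp only [pvApply, pvHit, if_neg hk, List.map_map]
    apply List.map_congr_left
    intro p _
    by_cases hf : f p
    · by_cases hm : d ∈ PySem.Set.add p.2 jid
      · simp [Function.comp, hf, hm]
      · simp [Function.comp, hf, hm]
    · simp [Function.comp, hf]

lemma pvFoldA_apply (jid : Int) (deps : List Int) (cj : List (Int × List Int))
    (hnd : (cj.map Prod.fst).Nodup) (f : Int × List Int → Bool) :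
    deps.foldl (pvStepA jid) (pvApply jid f cj)
      = pvApply jid (fun p => f p || deps.any (fun d => pvHit (cj.map Prod.fst) d p)) cj := by
  induction deps generalizing f with
  | nil => simp
  | cons d deps ih =>
      simp only [List.foldl_cons, pvStepA_apply jid d f cj hnd, ih, List.any_cons]
      congr 1
      funext p
      by_cases h1 : f p <;> by_cases h2 : pvHit (cj.map Prod.fst) d p <;> simp [h1, h2]

-- per entry of cj: B's test is exactly "some dependency hits this entry"
lemma pvCond_hit (cj : List (Int × List Int)) (deps : List Int) (p : Int × List Int) :
    (p.1 ∈ PySem.Set.ofList (deps.filter (fun d => d ∈ cj.map Prod.fst)) ∨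
        PySem.Set.isdisjoint (PySem.Set.ofList (deps.filter (fun d => d ∉ cj.map Prod.fst))) p.2 = false) ↔
      deps.any (fun d => pvHit (cj.map Prod.fst) d p) = true := by
  have hdis : PySem.Set.isdisjoint (PySem.Set.ofList (deps.filter (fun d => d ∉ cj.map Prod.fst))) p.2 = false ↔
      ∃ d ∈ deps, d ∉ cj.map Prod.fst ∧ d ∈ p.2 := by
    rw [← Bool.not_eq_true, PySem.Set.isdisjoint_iff]
    push Not
    simp only [PySem.Set.mem_ofList, List.mem_filter, decide_eq_true_eq]
    tauto
  rw [hdis, List.any_eq_true]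
  simp only [PySem.Set.mem_ofList, List.mem_filter, decide_eq_true_eq]
  constructor
  · rintro (⟨hd, hk⟩ | ⟨d, hd, hk, hm⟩)
    · exact ⟨p.1, hd, by simp [pvHit, hk]⟩
    · exact ⟨d, hd, by simp [pvHit, hk, hm]⟩
  · rintro ⟨d, hd, h⟩
    unfold pvHit at h
    by_cases hk : d ∈ cj.map Prod.fst
    · simp only [if_pos hk, decide_eq_true_eq] at h
      exact Or.inl ⟨h ▸ hd, h ▸ hk⟩
    · simp only [if_neg hk, decide_eq_true_eq] at h
      exact Or.inr ⟨d, hd, hk, h⟩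

-- ===== VERDICT (by name: the statement is the Claim_ definition above) =====
theorem add_dependencies_spec : Claim_equal_add_dependencies := by
  intro jid deps cj sorted _ hpre
  unfold Spec_add_dependencies add_dependencies add_dependencies_alt
  have hnd : (cj.map Prod.fst).Nodup := hpre
  have hA : deps.foldl (pvStepA jid) cj
      = pvApply jid (fun p => deps.any (fun d => pvHit (cj.map Prod.fst) d p)) cj := by
    have := pvFoldA_apply jid deps cj hnd (fun _ => false)
    simpa [pvApply_false] using this
  rw [hA]
  unfold pvApply
  apply List.map_congr_left
  intro p _
  by_cases h : p.1 ∈ PySem.Set.ofList (deps.filter (fun d => d ∈ cj.map Prod.fst)) ∨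
      PySem.Set.isdisjoint (PySem.Set.ofList (deps.filter (fun d => d ∉ cj.map Prod.fst))) p.2 = false
  · rw [if_pos ((pvCond_hit cj deps p).mp h), if_pos h]
  · have h2 : ¬ (deps.any (fun d => pvHit (cj.map Prod.fst) d p) = true) :=
      fun hh => h ((pvCond_hit cj deps p).mpr hh)
    rw [if_neg h2, if_neg h]
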